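-- pv_equiv track=rewrite | github.com/Raykeen/qtar-stego | qtar/core/imageqt.py | parse_qt_key
-- ===== SOURCE A (Python) =====
-- def parse_qt_key(key, block_count=1, result_key=None):
--     if result_key is None:
--         result_key = []
--
--     subdivide = bool(key.pop(0))
--     result_key.append(subdivide)
--     if subdivide:
--         block_count = block_count - 1
--         for i in range(4):
--             result_key, block_count = parse_qt_key(key, block_count + 1, result_key)
--
--     return result_key, block_count
-- ===== SOURCE B (Python) =====
-- def parse_qt_key(key, block_count=1, result_key=None):
--     if result_key is None:
--         result_key = []
--     pending = 1
--     leaves = 0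
--     while pending > 0:
--         subdivide = bool(key.pop(0))
--         result_key.append(subdivide)
--         pending -= 1
--         if subdivide:
--             pending += 4
--         else:
--             leaves += 1
--     return result_key, block_count + leaves - 1
-- ===== Notes on version B (the rewrite author's own statement) =====
-- stated objective: alternative
-- what changed: Replaces the recursive quadtree descent (threading block_count through 4 nested recursive calls) by a single flat while-loop with an integer pending-subtrees counter and a leaf counter, returning block_count + leaves - 1 in closed form; key is popped and result_key appended in place exactly as in A.
import Mathlib
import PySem

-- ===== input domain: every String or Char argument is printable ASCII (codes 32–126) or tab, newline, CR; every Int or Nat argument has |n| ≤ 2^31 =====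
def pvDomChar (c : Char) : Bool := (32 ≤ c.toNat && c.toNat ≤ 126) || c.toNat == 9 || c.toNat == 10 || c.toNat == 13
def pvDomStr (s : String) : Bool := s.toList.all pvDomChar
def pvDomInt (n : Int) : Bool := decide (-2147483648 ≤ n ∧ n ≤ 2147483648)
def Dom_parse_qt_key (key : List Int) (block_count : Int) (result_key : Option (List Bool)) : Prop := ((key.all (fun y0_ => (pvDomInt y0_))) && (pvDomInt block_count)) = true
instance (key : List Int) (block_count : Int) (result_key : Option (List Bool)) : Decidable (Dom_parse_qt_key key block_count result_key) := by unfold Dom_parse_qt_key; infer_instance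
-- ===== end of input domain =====

-- NOTE on side effects: both Pythons mutate their arguments identically (pop(0) the consumed
-- prefix of key, append to the same result_key list); the equivalence proved here is about the
-- return value. B replaces A's recursion by one flat loop with a pending/leaves counter.

-- ===== PORT A =====
-- A pops the head of key (IndexError on empty → none) and, on a subdivide flag, makes 4
-- sequential recursive calls threading (key, result_key, block_count). The fuel argument only
-- makes the same computation total: key.length + 1 is always enough (each level consumes an
-- element of key before recursing).
def parse_qt_key_core : Nat → List Int → Int → List Bool → Option (List Int × List Bool × Int)
  | 0, _, _, _ => none
  | fuel + 1, key, block_count, result_key =>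
    match key with
    | [] => none        -- key.pop(0) raises IndexError
    | k :: rest =>
      let subdivide := decide (k ≠ 0)     -- bool(key.pop(0))
      let rk1 := result_key ++ [subdivide]
      if subdivide then
        -- block_count = block_count - 1; for i in range(4): ... (unrolled, exactly 4 iterations)
        match parse_qt_key_core fuel rest ((block_count - 1) + 1) rk1 with
        | none => none
        | some (k1, r1, b1) =>
          match parse_qt_key_core fuel k1 (b1 + 1) r1 with
          | none => none
          | some (k2, r2, b2) =>
            match parse_qt_key_core fuel k2 (b2 + 1) r2 with
            | none => none
            | some (k3, r3, b3) =>
              match parse_qt_key_core fuel k3 (b3 + 1) r3 with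
              | none => none
              | some (k4, r4, b4) => some (k4, r4, b4)
      else some (rest, rk1, block_count)

def parse_qt_key (key : List Int) (block_count : Int) (result_key : Option (List Bool)) : List Bool × Int :=
  match parse_qt_key_core (key.length + 1) key block_count (result_key.getD []) with
  | some (_, r, b) => (r, b)
  | none => ([], 0)     -- unreachable under Pre_parse_qt_key (Python raises IndexError here)

-- ===== PORT B =====
-- B's while-loop: state = (remaining key, pending subtrees, result_key so far, leaves seen).
def parse_qt_key_alt_loop (key : List Int) (pending : Nat) (result_key : List Bool) (leaves : Int) :
    Option (List Int × List Bool × Int) :=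
  if pending = 0 then some (key, result_key, leaves)
  else
    match key with
    | [] => none        -- key.pop(0) raises IndexError
    | k :: rest =>
      let subdivide := decide (k ≠ 0)
      if subdivide then parse_qt_key_alt_loop rest (pending - 1 + 4) (result_key ++ [subdivide]) leaves
      else parse_qt_key_alt_loop rest (pending - 1) (result_key ++ [subdivide]) (leaves + 1)

def parse_qt_key_alt (key : List Int) (block_count : Int) (result_key : Option (List Bool)) : List Bool × Int :=
  match parse_qt_key_alt_loop key 1 (result_key.getD []) 0 with
  | some (_, r, leaves) => (r, block_count + leaves - 1)
  | none => ([], 0)     -- unreachable under Pre_parse_qt_key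

-- ===== PRECONDITION & SPEC =====
-- Each consumed key entry moves the number of still-pending subtrees by +3 (truthy) or -1
-- (falsy); A returns normally iff some prefix brings the initial 1 down to exactly 0,
-- otherwise key.pop(0) raises IndexError. Pre_ excludes exactly those raising inputs.
def qtStep (k : Int) : Int := if k ≠ 0 then 3 else -1

def Pre_parse_qt_key (key : List Int) (block_count : Int) (result_key : Option (List Bool)) : Prop :=
  ∃ n ∈ List.range (key.length + 1), 1 + ((key.take n).map qtStep).sum = 0
instance (key : List Int) (block_count : Int) (result_key : Option (List Bool)) : Decidable (Pre_parse_qt_key key block_count result_key) := by unfold Pre_parse_qt_key; infer_instance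

def pvWitness_parse_qt_key : List Int × Int × Option (List Bool) := ([1, 0, 0, 0, 0], 1, none)

def Spec_parse_qt_key (key : List Int) (block_count : Int) (result_key : Option (List Bool)) (out : List Bool × Int) : Prop := out = parse_qt_key_alt key block_count result_key
instance (key : List Int) (block_count : Int) (result_key : Option (List Bool)) (out : List Bool × Int) : Decidable (Spec_parse_qt_key key block_count result_key out) := by unfold Spec_parse_qt_key; infer_instance

-- ===== CLAIM (what is proved, stated in full; the proofs are below) =====
def Claim_equal_parse_qt_key : Prop := ∀ (key : List Int) (block_count : Int) (result_key : Option (List Bool)), Dom_parse_qt_key key block_count result_key → Pre_parse_qt_key key block_count result_key → Spec_parse_qt_key key block_count result_key (parse_qt_key key block_count result_key)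

-- ===== LEMMAS AND PROOFS =====

-- The loop only drops a prefix of key.
theorem alt_loop_length {key : List Int} {p : Nat} {rk : List Bool} {l : Int}
    {k' : List Int} {r' : List Bool} {l' : Int}
    (h : parse_qt_key_alt_loop key p rk l = some (k', r', l')) : k'.length ≤ key.length := by
  induction key generalizing p rk l with
  | nil =>
    rw [parse_qt_key_alt_loop.eq_def] at h
    split at h
    · simp_all
    · exact absurd h (by simp)
  | cons k rest ih =>
    rw [parse_qt_key_alt_loop.eq_def] at h
    split at h
    · obtain ⟨rfl, rfl, rfl⟩ := by simpa using h
      exact le_rfl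
    · simp only at h
      split at h
      · exact (ih h).trans (by simp)
      · exact (ih h).trans (by simp)

-- Composition: running pending p+q is running pending q, then pending p on the remainder.
theorem alt_loop_comp (p : Nat) (key : List Int) (q : Nat) (rk : List Bool) (l : Int) :
    parse_qt_key_alt_loop key (p + q) rk l =
      (parse_qt_key_alt_loop key q rk l).bind
        (fun s => parse_qt_key_alt_loop s.1 p s.2.1 s.2.2) := by
  induction key generalizing q rk l with
  | nil =>
    rcases Nat.eq_zero_or_pos q with hq | hq
    · subst hq
      conv_rhs => rw [parse_qt_key_alt_loop.eq_def]
      simp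
    · rw [parse_qt_key_alt_loop.eq_def]
      conv_rhs => rw [parse_qt_key_alt_loop.eq_def]
      rw [if_neg (by omega : ¬ (p + q = 0)), if_neg (by omega : ¬ (q = 0))]
      rfl
  | cons k rest ih =>
    rcases Nat.eq_zero_or_pos q with hq | hq
    · subst hq
      conv_rhs => rw [parse_qt_key_alt_loop.eq_def]
      simp
    · rw [parse_qt_key_alt_loop.eq_def]
      conv_rhs => rw [parse_qt_key_alt_loop.eq_def]
      rw [if_neg (by omega : ¬ (p + q = 0)), if_neg (by omega : ¬ (q = 0))]
      simp only
      by_cases hk : k = 0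
      · simp only [ne_eq, hk, not_true_eq_false, decide_false, Bool.false_eq_true, if_false]
        have e : p + q - 1 = p + (q - 1) := by omega
        rw [e, ih]
      · simp only [ne_eq, hk, not_false_eq_true, decide_true, if_true]
        have e : p + q - 1 + 4 = p + (q - 1 + 4) := by omega
        rw [e, ih]

-- The leaves accumulator only shifts the leaf component of the result.
theorem alt_loop_shift (key : List Int) (p : Nat) (rk : List Bool) (l : Int) :
    parse_qt_key_alt_loop key p rk l =
      (parse_qt_key_alt_loop key p rk 0).map (fun s => (s.1, s.2.1, s.2.2 + l)) := by
  induction key generalizing p rk l with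
  | nil =>
    rw [parse_qt_key_alt_loop.eq_def]
    conv_rhs => rw [parse_qt_key_alt_loop.eq_def]
    split
    · simp
    · rfl
  | cons k rest ih =>
    rw [parse_qt_key_alt_loop.eq_def]
    conv_rhs => rw [parse_qt_key_alt_loop.eq_def]
    split
    · simp
    · simp only
      by_cases hk : k = 0
      · simp only [ne_eq, hk, not_true_eq_false, decide_false, Bool.false_eq_true, if_false]
        rw [ih _ _ (l + 1), ih _ _ (0 + 1), Option.map_map]
        congr 1
        funext s
        simp
        ring
      · simp only [ne_eq, hk, not_false_eq_true, decide_true, if_true]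
        exact ih _ _ _

-- A's recursion computes the same as B's loop run for one subtree, with the block count
-- rewritten as block_count + leaves - 1.
theorem core_eq_loop (fuel : Nat) (key : List Int) (hf : key.length < fuel)
    (bc : Int) (rk : List Bool) :
    parse_qt_key_core fuel key bc rk =
      (parse_qt_key_alt_loop key 1 rk 0).map (fun s => (s.1, s.2.1, bc + s.2.2 - 1)) := by
  induction fuel generalizing key bc rk with
  | zero => omega
  | succ fuel ih =>
    match key with
    | [] =>
      rw [parse_qt_key_core, parse_qt_key_alt_loop.eq_def]
      simp
    | k :: rest =>
      rw [parse_qt_key_core]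
      conv_rhs => rw [parse_qt_key_alt_loop.eq_def]
      simp only [Nat.one_ne_zero, if_false]
      by_cases hk : k = 0
      · simp only [ne_eq, hk, not_true_eq_false, decide_false, Bool.false_eq_true, if_false]
        rw [parse_qt_key_alt_loop.eq_def]
        norm_num
      · simp only [ne_eq, hk, not_false_eq_true, decide_true, if_true]
        have hrest : rest.length < fuel := by simp at hf; omega
        rw [ih rest hrest ((bc - 1) + 1) (rk ++ [true])]
        -- decompose loop rest 4 into four single-subtree runs
        have h4 : (3:Nat) + 1 = 4 := rfl
        rw [(by omega : (1:Nat) - 1 + 4 = 4), ← h4, alt_loop_comp]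
        cases h1 : parse_qt_key_alt_loop rest 1 (rk ++ [true]) 0 with
        | none => simp
        | some s1 =>
          obtain ⟨k1, r1, l1⟩ := s1
          have hk1 : k1.length < fuel := lt_of_le_of_lt (alt_loop_length h1) hrest
          simp only [Option.map_some, Option.bind_some]
          rw [alt_loop_shift k1 3 r1 l1, Option.map_map]
          have h3 : (2:Nat) + 1 = 3 := rfl
          rw [← h3, alt_loop_comp]
          rw [ih k1 hk1 (bc - 1 + 1 + l1 - 1 + 1) r1]
          cases h2 : parse_qt_key_alt_loop k1 1 r1 0 with
          | none => simp
          | some s2 =>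
            obtain ⟨k2, r2, l2⟩ := s2
            have hk2 : k2.length < fuel := lt_of_le_of_lt (alt_loop_length h2) hk1
            simp only [Option.map_some, Option.bind_some]
            rw [alt_loop_shift k2 2 r2 l2, Option.map_map]
            have h2' : (1:Nat) + 1 = 2 := rfl
            rw [← h2', alt_loop_comp]
            rw [ih k2 hk2 (bc - 1 + 1 + l1 - 1 + 1 + l2 - 1 + 1) r2]
            cases h3' : parse_qt_key_alt_loop k2 1 r2 0 with
            | none => simp
            | some s3 =>
              obtain ⟨k3, r3, l3⟩ := s3
              have hk3 : k3.length < fuel := lt_of_le_of_lt (alt_loop_length h3') hk2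
              simp only [Option.map_some, Option.bind_some]
              rw [alt_loop_shift k3 1 r3 l3, Option.map_map]
              rw [ih k3 hk3 (bc - 1 + 1 + l1 - 1 + 1 + l2 - 1 + 1 + l3 - 1 + 1) r3]
              cases h4' : parse_qt_key_alt_loop k3 1 r3 0 with
              | none => simp
              | some s4 =>
                obtain ⟨k4, r4, l4⟩ := s4
                simp only [Option.map_some, Function.comp_apply, Option.some.injEq,
                  Prod.mk.injEq, true_and]
                ring

-- Success of the loop is exactly the prefix-sum condition of Pre_.
theorem alt_loop_isSome_iff (key : List Int) (p : Nat) (rk : List Bool) (l : Int) :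
    (parse_qt_key_alt_loop key p rk l).isSome = true ↔
      ∃ n ≤ key.length, (p : Int) + ((key.take n).map qtStep).sum = 0 := by
  induction key generalizing p rk l with
  | nil =>
    rw [parse_qt_key_alt_loop.eq_def]
    rcases Nat.eq_zero_or_pos p with hp | hp
    · subst hp; simp
    · rw [if_neg (by omega : ¬ (p = 0))]
      constructor
      · intro h; exact absurd h (by simp)
      · rintro ⟨n, hn, hs⟩
        simp only [List.length_nil, Nat.le_zero] at hn
        subst hn
        simp at hs
        omega
  | cons k rest ih =>
    rw [parse_qt_key_alt_loop.eq_def]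
    rcases Nat.eq_zero_or_pos p with hp | hp
    · subst hp
      rw [if_pos rfl]
      simp only [Option.isSome_some, true_iff]
      exact ⟨0, by simp⟩
    · rw [if_neg (by omega : ¬ (p = 0))]
      simp only
      by_cases hk : k = 0
      · have hstep : qtStep (0:Int) = -1 := by simp [qtStep]
        simp only [ne_eq, hk, not_true_eq_false, decide_false, Bool.false_eq_true, if_false]
        rw [ih]
        have hc : ((p - 1 : Nat) : Int) = (p : Int) - 1 := by omega
        constructor
        · rintro ⟨m, hm, hs⟩
          refine ⟨m + 1, by simpa using Nat.succ_le_succ hm, ?_⟩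
          simp only [List.take_succ_cons, List.map_cons, List.sum_cons, hstep]
          rw [hc] at hs; linarith
        · rintro ⟨n, hn, hs⟩
          match n with
          | 0 => simp at hs; omega
          | m + 1 =>
            refine ⟨m, by simpa using Nat.le_of_succ_le_succ hn, ?_⟩
            simp only [List.take_succ_cons, List.map_cons, List.sum_cons, hstep] at hs
            rw [hc]; linarith
      · have hstep : qtStep k = 3 := by simp [qtStep, hk]
        simp only [ne_eq, hk, not_false_eq_true, decide_true, if_true]
        rw [ih]
        have hc : ((p - 1 + 4 : Nat) : Int) = (p : Int) + 3 := by omega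
        constructor
        · rintro ⟨m, hm, hs⟩
          refine ⟨m + 1, by simpa using Nat.succ_le_succ hm, ?_⟩
          simp only [List.take_succ_cons, List.map_cons, List.sum_cons, hstep]
          rw [hc] at hs; linarith
        · rintro ⟨n, hn, hs⟩
          match n with
          | 0 => simp at hs; omega
          | m + 1 =>
            refine ⟨m, by simpa using Nat.le_of_succ_le_succ hn, ?_⟩
            simp only [List.take_succ_cons, List.map_cons, List.sum_cons, hstep] at hs
            rw [hc]; linarith

-- ===== VERDICT (by name: the statement is the Claim_ definition above) =====
theorem parse_qt_key_spec : Claim_equal_parse_qt_key := by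
  intro key bc rk _ hpre
  unfold Spec_parse_qt_key parse_qt_key parse_qt_key_alt
  obtain ⟨n, hn, hs⟩ := hpre
  have hsome : (parse_qt_key_alt_loop key 1 (rk.getD []) 0).isSome = true := by
    rw [alt_loop_isSome_iff]
    exact ⟨n, by simpa using hn, by simpa using hs⟩
  rw [core_eq_loop (key.length + 1) key (by omega) bc (rk.getD [])]
  cases h : parse_qt_key_alt_loop key 1 (rk.getD []) 0 with
  | none => rw [h] at hsome; simp at hsome
  | some s => rfl
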